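-- pv_equiv track=rewrite | github.com/skirchess/ComPy | assignment4/MyLibrary.py | polycoeff
-- ===== SOURCE A (Python) =====
-- def polycoeff(x,y,k): #x-data, y-data, k-degree of polynomial
--     def sumik(x,k):
--         add=0
--         for i in range(len(x)):
--             add+=(x[i])**k
--         return add
--
--     def sumxyik(x,y,k):
--         add=0
--         for i in range(len(x)):
--             add+=((x[i])**k)*y[i]
--         return add
--     X,Y=[],[]
--     for i in range(k+1):  # Filling X,Y matrix with 0s accordingly
--         rowx=[]
--         rowy=[0]
--         X.append(rowx)
--         Y.append(rowy)
--         for j in range(k+1):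
--             rowx.append(0)
--     for i in range(len(X)):  # Filling X matrix with required elements
--         for j in range(len(X)):
--             if i==j:
--                 X[i][j]=sumik(x,2*i)
--
--             if i!=j and i>j:
--                 X[i][j]=sumik(x,i+j)
--             X[j][i]=X[i][j]
--     for i in range(len(Y)): # Filling Y matrix with required elements
--         Y[i][0]=sumxyik(x,y,i)
--     return X,Y
-- ===== SOURCE B (Python) =====
-- def polycoeff(x, y, k):
--     # Precompute power sums S[e] = sum(xi**e) for e = 0..2k and moment sums
--     # T[e] = sum(xi**e * yi) for e = 0..k in one pass over the data, then fill
--     # the normal-equations matrices by slicing S and listing T.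
--     if k < 0:
--         return [], []
--     m = 2 * k + 1
--     S = [0] * m
--     T = [0] * (k + 1)
--     for xi, yi in zip(x, y):
--         p = 1
--         for e in range(m):
--             S[e] += p
--             if e <= k:
--                 T[e] += p * yi
--             p *= xi
--     X = [S[i:i + k + 1] for i in range(k + 1)]
--     Y = [[t] for t in T]
--     return X, Y
-- ===== Notes on version B (the rewrite author's own statement) =====
-- stated objective: alternative
-- what changed: B precomputes the power sums S[e]=sum(xi**e) for e=0..2k and the moments T[e]=sum(xi**e*yi) for e=0..k in a single pass over the data, then fills X by slicing S and Y by listing T, instead of A's per-entry summation loops over x inside a symmetric double loop (fewer arithmetic operations: O(n*k + k^2) vs O(n*k^2), though big-integer growth dominates on the largest inputs).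
import Mathlib
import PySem

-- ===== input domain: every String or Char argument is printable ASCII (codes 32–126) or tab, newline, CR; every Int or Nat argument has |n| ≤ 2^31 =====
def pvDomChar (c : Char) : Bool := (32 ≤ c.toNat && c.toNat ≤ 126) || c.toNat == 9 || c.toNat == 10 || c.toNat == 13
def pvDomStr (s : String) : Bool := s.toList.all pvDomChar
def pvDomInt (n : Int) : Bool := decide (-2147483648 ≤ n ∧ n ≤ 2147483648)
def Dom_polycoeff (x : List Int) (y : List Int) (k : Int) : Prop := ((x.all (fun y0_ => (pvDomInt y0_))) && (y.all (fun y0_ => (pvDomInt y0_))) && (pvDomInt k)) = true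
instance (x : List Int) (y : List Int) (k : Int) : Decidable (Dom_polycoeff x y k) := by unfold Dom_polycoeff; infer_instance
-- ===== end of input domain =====

-- B precomputes the power sums S[e]=Σ xi^e (e = 0..2k) and moments T[e]=Σ xi^e·yi in one
-- pass over the data and fills the matrices by slicing/lookup, instead of A's per-entry
-- summation loops over x inside a symmetric double loop (objective: alternative algorithm).

-- ===== PORT A =====
-- helper sumik: 'for i in range(len(x)): add += x[i]**k'. Indices from range(len(x)) are
-- in range, so List.getD is exact; the exponent k is nonnegative at every call site
-- (2*i, i+j, i with i,j ≥ 0), so k.toNat is exact.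
def pvSumik (x : List Int) (k : Int) : Int :=
  (List.range x.length).foldl (fun add i => add + (x.getD i 0) ^ k.toNat) 0

-- helper sumxyik: as above plus the factor y[i] (in range whenever Pre_ holds).
def pvSumxyik (x : List Int) (y : List Int) (k : Int) : Int :=
  (List.range x.length).foldl (fun add i => add + (x.getD i 0) ^ k.toNat * (y.getD i 0)) 0

-- X[i][j] = v (item assignment on a list of rows; indices in range, so set/getD exact)
def pvSet2 (m : List (List Int)) (i j : Nat) (v : Int) : List (List Int) :=
  m.set i ((m.getD i []).set j v)

-- X[i][j] (read)
def pvGet2 (m : List (List Int)) (i j : Nat) : Int := (m.getD i []).getD j 0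

-- first loop of A: build X,Y filled with zeros; range(k+1) has (k+1).toNat iterations,
-- which is exact also for k < 0 (empty range).
def pvInit (k : Int) : List (List Int) × List (List Int) :=
  (List.range (k+1).toNat).foldl (fun (XY : List (List Int) × List (List Int)) _ =>
    let rowx := (List.range (k+1).toNat).foldl (fun r (_ : Nat) => r ++ [(0:Int)]) []
    (XY.1 ++ [rowx], XY.2 ++ [[(0:Int)]])) ([], [])

-- body of A's double fill loop, step for step (the two ifs, then X[j][i] = X[i][j])
def pvInner (x : List Int) (i : Nat) (X : List (List Int)) (j : Nat) : List (List Int) :=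
  let X1 := if i = j then pvSet2 X i j (pvSumik x (2*(i:Int))) else X
  let X2 := if i ≠ j ∧ i > j then pvSet2 X1 i j (pvSumik x ((i:Int)+(j:Int))) else X1
  pvSet2 X2 j i (pvGet2 X2 i j)

-- 'for j in range(len(X))'
def pvOuter (x : List Int) (n : Nat) (X : List (List Int)) (i : Nat) : List (List Int) :=
  (List.range n).foldl (pvInner x i) X

def polycoeff (x : List Int) (y : List Int) (k : Int) : List (List Int) × List (List Int) :=
  let X0 := (pvInit k).1
  let Y0 := (pvInit k).2
  let X1 := (List.range X0.length).foldl (pvOuter x X0.length) X0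
  let Y1 := (List.range Y0.length).foldl (fun Y i => pvSet2 Y i 0 (pvSumxyik x y (i:Int))) Y0
  (X1, Y1)

-- ===== PORT B =====
-- one element (xi, yi): inner loop 'for e in range(2k+1)' updating S[e], T[e] and the
-- running power p (state (S, T, p)); range(2k+1) has (2*k+1).toNat iterations.
def pvStepB (k : Int) (ST : List Int × List Int) (xy : Int × Int) : List Int × List Int :=
  let r := (List.range (2*k+1).toNat).foldl
      (fun (s : List Int × List Int × Int) e =>
        (s.1.set e (s.1.getD e 0 + s.2.2),
         if (e:Int) ≤ k then s.2.1.set e (s.2.1.getD e 0 + s.2.2 * xy.2) else s.2.1,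
         s.2.2 * xy.1)) (ST.1, ST.2, 1)
  (r.1, r.2.1)

def polycoeff_alt (x : List Int) (y : List Int) (k : Int) : List (List Int) × List (List Int) :=
  if k < 0 then ([], []) else
  let ST := (x.zip y).foldl (pvStepB k)
      (List.replicate (2*k+1).toNat 0, List.replicate (k+1).toNat 0)
  ((List.range (k+1).toNat).map
      (fun (i : Nat) => PySem.List.slice ST.1 (some (i:Int)) (some ((i:Int) + k + 1))),
   ST.2.map (fun t => [t]))

-- ===== PRECONDITION & SPEC =====
-- Pre_ excludes exactly the inputs where A raises: for k ≥ 0, sumxyik indexes y[i] for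
-- every i < len(x), an IndexError whenever len(x) > len(y).
def Pre_polycoeff (x : List Int) (y : List Int) (k : Int) : Prop :=
  k < 0 ∨ x.length ≤ y.length
instance (x : List Int) (y : List Int) (k : Int) : Decidable (Pre_polycoeff x y k) := by
  unfold Pre_polycoeff; infer_instance

def pvWitness_polycoeff : List Int × List Int × Int := ([1, 2], [1, 4], 1)

def Spec_polycoeff (x : List Int) (y : List Int) (k : Int) (out : List (List Int) × List (List Int)) : Prop := out = polycoeff_alt x y k
instance (x : List Int) (y : List Int) (k : Int) (out : List (List Int) × List (List Int)) : Decidable (Spec_polycoeff x y k out) := by unfold Spec_polycoeff; infer_instance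

-- ===== CLAIM (what is proved, stated in full; the proofs are below) =====
def Claim_equal_polycoeff : Prop := ∀ (x : List Int) (y : List Int) (k : Int), Dom_polycoeff x y k → Pre_polycoeff x y k → Spec_polycoeff x y k (polycoeff x y k)

-- ===== LEMMAS AND PROOFS =====

-- the common closed forms both ports are reduced to
def pvTbl (n : Nat) (f : Nat → Nat → Int) : List (List Int) :=
  (List.range n).map (fun r => (List.range n).map (f r))
def pvTblY (n : Nat) (g : Nat → Int) : List (List Int) :=
  (List.range n).map (fun r => [g r])
def pvTblS (n : Nat) (s : Nat → Int) : List Int := (List.range n).map s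

theorem pvTbl_congr {n : Nat} {f g : Nat → Nat → Int}
    (h : ∀ r c, r < n → c < n → f r c = g r c) : pvTbl n f = pvTbl n g := by
  unfold pvTbl
  refine List.map_congr_left (fun r hr => ?_)
  exact List.map_congr_left (fun c hc => h r c (List.mem_range.1 hr) (List.mem_range.1 hc))

theorem pvTblY_congr {n : Nat} {f g : Nat → Int}
    (h : ∀ r, r < n → f r = g r) : pvTblY n f = pvTblY n g := by
  unfold pvTblY
  exact List.map_congr_left (fun r hr => by rw [h r (List.mem_range.1 hr)])

theorem pvTblS_congr {n : Nat} {f g : Nat → Int}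
    (h : ∀ r, r < n → f r = g r) : pvTblS n f = pvTblS n g :=
  List.map_congr_left (fun r hr => h r (List.mem_range.1 hr))

theorem pvSetMapRange {α : Type} (f : Nat → α) {n i : Nat} (v : α) (hi : i < n) :
    ((List.range n).map f).set i v = (List.range n).map (fun j => if j = i then v else f j) := by
  apply List.ext_getElem
  · simp
  · intro j h1 h2
    simp only [List.getElem_set, List.getElem_map, List.getElem_range]
    simp only [List.length_set, List.length_map, List.length_range] at h1
    split_ifs with h3 h4 h5 <;> first | rfl | omega

theorem pvGetDMapRange {α : Type} (f : Nat → α) {n i : Nat} (d : α) (hi : i < n) :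
    ((List.range n).map f).getD i d = f i := by
  rw [List.getD_eq_getElem _ _ (by simpa using hi)]
  simp

theorem pvSet2_tbl {n : Nat} (f : Nat → Nat → Int) {i j : Nat} (v : Int)
    (hi : i < n) (hj : j < n) :
    pvSet2 (pvTbl n f) i j v =
      pvTbl n (fun r c => if r = i ∧ c = j then v else f r c) := by
  unfold pvSet2 pvTbl
  rw [pvGetDMapRange _ _ hi, pvSetMapRange _ _ hj, pvSetMapRange _ _ hi]
  refine List.map_congr_left (fun r _ => ?_)
  by_cases hr : r = i
  · subst hr
    simp only [if_pos rfl]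
    refine List.map_congr_left (fun c _ => ?_)
    by_cases hc : c = j <;> simp [hc]
  · simp only [if_neg hr]
    refine List.map_congr_left (fun c _ => ?_)
    simp [hr]

theorem pvGet2_tbl {n : Nat} (f : Nat → Nat → Int) {i j : Nat} (hi : i < n) (hj : j < n) :
    pvGet2 (pvTbl n f) i j = f i j := by
  unfold pvGet2 pvTbl
  rw [pvGetDMapRange _ _ hi, pvGetDMapRange _ _ hj]

theorem pvSet2_tblY {n : Nat} (g : Nat → Int) {i : Nat} (v : Int) (hi : i < n) :
    pvSet2 (pvTblY n g) i 0 v = pvTblY n (fun r => if r = i then v else g r) := by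
  unfold pvSet2 pvTblY
  rw [pvGetDMapRange _ _ hi, pvSetMapRange _ _ hi]
  refine List.map_congr_left (fun r _ => ?_)
  by_cases hr : r = i <;> simp [hr]

-- foldl of '+ g i' is a sum
theorem pvFoldlAddSum {β : Type} (g : β → Int) :
    ∀ (L : List β) (c : Int), L.foldl (fun a i => a + g i) c = c + (L.map g).sum := by
  intro L
  induction L with
  | nil => simp
  | cons h t ih => intro c; simp [ih, add_assoc]

theorem pvMapRangeGetD {α γ : Type} (x : List α) (d : α) (g : α → γ) :
    (List.range x.length).map (fun i => g (x.getD i d)) = x.map g := by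
  apply List.ext_getElem
  · simp
  · intro j h1 h2
    simp only [List.getElem_map, List.getElem_range]
    rw [List.getD_eq_getElem _ _ (by simpa using h2)]

theorem pvSumik_eq (x : List Int) (t : Int) :
    pvSumik x t = (x.map (fun a => a ^ t.toNat)).sum := by
  unfold pvSumik
  rw [pvFoldlAddSum, pvMapRangeGetD x 0 (fun a => a ^ t.toNat), zero_add]

theorem pvSumxyik_eq (x y : List Int) (t : Int) :
    pvSumxyik x y t =
      ((List.range x.length).map (fun i => (x.getD i 0) ^ t.toNat * (y.getD i 0))).sum := by
  unfold pvSumxyik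
  rw [pvFoldlAddSum, zero_add]

-- ----- characterization of A -----

theorem pvSumPowCongr (x : List Int) (e1 e2 : Nat) (h : e1 = e2) :
    (x.map (fun a => a ^ e1)).sum = (x.map (fun a => a ^ e2)).sum := by rw [h]

theorem pvFoldlAppendRepl {α β : Type} (r0 : α) :
    ∀ (L : List β) (acc : List α),
      L.foldl (fun a _ => a ++ [r0]) acc = acc ++ List.replicate L.length r0 := by
  intro L
  induction L with
  | nil => simp
  | cons h t ih => intro acc; simp [ih, List.replicate_succ, List.append_assoc]

theorem pvFoldlPairAppend (r0 y0 : List Int) :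
    ∀ (L : List Nat) (a b : List (List Int)),
      L.foldl (fun (XY : List (List Int) × List (List Int)) _ => (XY.1 ++ [r0], XY.2 ++ [y0])) (a, b)
        = (a ++ List.replicate L.length r0, b ++ List.replicate L.length y0) := by
  intro L
  induction L with
  | nil => simp
  | cons h t ih =>
      intro a b
      simp [List.foldl_cons, ih, List.replicate_succ, List.append_assoc]

theorem pvReplTbl (n : Nat) :
    List.replicate n (List.replicate n (0:Int)) = pvTbl n (fun _ _ => 0) := by
  unfold pvTbl
  apply List.ext_getElem <;> simp

theorem pvReplTblY (n : Nat) :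
    List.replicate n [(0:Int)] = pvTblY n (fun _ => 0) := by
  unfold pvTblY
  apply List.ext_getElem <;> simp

theorem pvInit_eq (k : Int) :
    pvInit k = (pvTbl (k+1).toNat (fun _ _ => 0), pvTblY (k+1).toNat (fun _ => 0)) := by
  unfold pvInit
  have hrow : (List.range (k+1).toNat).foldl (fun r (_ : Nat) => r ++ [(0:Int)]) [] =
      List.replicate (k+1).toNat (0:Int) := by
    rw [pvFoldlAppendRepl]; simp
  simp only [hrow]
  rw [pvFoldlPairAppend]
  simp [pvReplTbl, pvReplTblY]

-- fill-loop invariant function: entries already holding their final value after outer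
-- iterations < i and, inside outer iteration i, inner iterations < j
def pvF (x : List Int) (i j : Nat) : Nat → Nat → Int := fun r c =>
  if (r < i ∧ c < i) ∨ (r = i ∧ c < j ∧ c ≤ i) ∨ (c = i ∧ r < j ∧ r < i)
  then (x.map (fun a => a ^ (r+c))).sum else 0

theorem pvInnerLoop (x : List Int) {n i : Nat} (hi : i < n) :
    ∀ j, j ≤ n →
      (List.range j).foldl (pvInner x i) (pvTbl n (pvF x i 0)) = pvTbl n (pvF x i j) := by
  intro j
  induction j with
  | zero => intro _; simp
  | succ j ih =>
      intro hj
      rw [List.range_succ, List.foldl_append, ih (by omega), List.foldl_cons, List.foldl_nil]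
      have hjn : j < n := by omega
      simp only [pvInner]
      rcases Nat.lt_trichotomy i j with hlt | heq | hgt
      · -- i < j : both ifs are skipped; X[j][i] := X[i][j] = 0 (already 0)
        rw [if_neg (by omega : ¬ i = j), if_neg (by omega : ¬ (i ≠ j ∧ i > j))]
        rw [pvGet2_tbl _ hi hjn, pvSet2_tbl _ _ hjn hi]
        apply pvTbl_congr
        intro r c hr hc
        unfold pvF
        split_ifs <;> first | rfl | (exfalso; omega) | exact pvSumPowCongr x _ _ (by omega)
      · -- i = j : diagonal
        subst heq
        rw [if_pos rfl, if_neg (by omega : ¬ (i ≠ i ∧ i > i))]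
        have hv : pvSumik x (2*(i:Int)) = (x.map (fun a => a ^ (i+i))).sum := by
          rw [pvSumik_eq]; exact pvSumPowCongr x _ _ (by omega)
        rw [hv, pvSet2_tbl _ _ hi hi, pvGet2_tbl _ hi hi, if_pos ⟨rfl, rfl⟩,
            pvSet2_tbl _ _ hi hi]
        apply pvTbl_congr
        intro r c hr hc
        unfold pvF
        split_ifs <;> first | rfl | (exfalso; omega) | exact pvSumPowCongr x _ _ (by omega)
      · -- j < i : strict lower entry, then its mirror
        rw [if_neg (by omega : ¬ i = j), if_pos ⟨by omega, hgt⟩]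
        have hv : pvSumik x ((i:Int)+(j:Int)) = (x.map (fun a => a ^ (i+j))).sum := by
          rw [pvSumik_eq]; exact pvSumPowCongr x _ _ (by omega)
        rw [hv, pvSet2_tbl _ _ hi hjn, pvGet2_tbl _ hi hjn, if_pos ⟨rfl, rfl⟩,
            pvSet2_tbl _ _ hjn hi]
        apply pvTbl_congr
        intro r c hr hc
        unfold pvF
        split_ifs <;> first | rfl | (exfalso; omega) | exact pvSumPowCongr x _ _ (by omega)

theorem pvOuterLoop (x : List Int) (n : Nat) :
    ∀ i, i ≤ n →
      (List.range i).foldl (pvOuter x n) (pvTbl n (fun _ _ => 0)) =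
        pvTbl n (fun r c => if r < i ∧ c < i then (x.map (fun a => a ^ (r+c))).sum else 0) := by
  intro i
  induction i with
  | zero => intro _; simp
  | succ i ih =>
      intro hin
      have hi : i < n := by omega
      rw [List.range_succ, List.foldl_append, ih (by omega), List.foldl_cons, List.foldl_nil]
      unfold pvOuter
      have h0 : pvTbl n (fun r c => if r < i ∧ c < i then (x.map (fun a => a ^ (r+c))).sum else 0)
          = pvTbl n (pvF x i 0) := by
        apply pvTbl_congr; intro r c _ _; unfold pvF
        split_ifs <;> first | rfl | (exfalso; omega)
      rw [h0, pvInnerLoop x hi n le_rfl]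
      apply pvTbl_congr
      intro r c hr hc
      unfold pvF
      split_ifs <;> first | rfl | (exfalso; omega)

theorem pvYLoop (x y : List Int) (n : Nat) :
    ∀ i, i ≤ n →
      (List.range i).foldl (fun Y r => pvSet2 Y r 0 (pvSumxyik x y (r:Int))) (pvTblY n (fun _ => 0)) =
        pvTblY n (fun r => if r < i then pvSumxyik x y (r:Int) else 0) := by
  intro i
  induction i with
  | zero => intro _; simp
  | succ i ih =>
      intro hin
      have hi : i < n := by omega
      rw [List.range_succ, List.foldl_append, ih (by omega), List.foldl_cons, List.foldl_nil]
      rw [pvSet2_tblY _ _ hi]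
      apply pvTblY_congr
      intro r hr
      split_ifs with h1 h2 h3 <;> first | rfl | (exfalso; omega) | (rw [h1])

theorem pvTbl_length (n : Nat) (f : Nat → Nat → Int) : (pvTbl n f).length = n := by
  simp [pvTbl]

theorem polycoeff_eq (x y : List Int) (k : Int) :
    polycoeff x y k =
      (pvTbl (k+1).toNat (fun r c => (x.map (fun a => a ^ (r+c))).sum),
       pvTblY (k+1).toNat (fun r => pvSumxyik x y (r:Int))) := by
  have hY : (pvTblY (k+1).toNat (fun _ => (0:Int))).length = (k+1).toNat := by simp [pvTblY]
  simp only [polycoeff, pvInit_eq, pvTbl_length, hY]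
  refine Prod.ext ?_ ?_
  · rw [pvOuterLoop x _ _ le_rfl]
    apply pvTbl_congr
    intro r c hr hc
    rw [if_pos ⟨hr, hc⟩]
  · rw [pvYLoop x y _ _ le_rfl]
    apply pvTblY_congr
    intro r hr
    rw [if_pos hr]

-- ----- characterization of B -----

theorem pvReplTblS (n : Nat) : List.replicate n (0:Int) = pvTblS n (fun _ => 0) := by
  unfold pvTblS
  apply List.ext_getElem <;> simp

theorem pvStepB_eq {k : Int} (hk : 0 ≤ k) (s t : Nat → Int) (a b : Int) :
    pvStepB k (pvTblS (2*k+1).toNat s, pvTblS (k+1).toNat t) (a, b) =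
      (pvTblS (2*k+1).toNat (fun e => s e + a ^ e),
       pvTblS (k+1).toNat (fun e => t e + a ^ e * b)) := by
  have hnm : (k+1).toNat ≤ (2*k+1).toNat := by omega
  have inv : ∀ e, e ≤ (2*k+1).toNat →
      (List.range e).foldl
        (fun (st : List Int × List Int × Int) e' =>
          (st.1.set e' (st.1.getD e' 0 + st.2.2),
           if (e':Int) ≤ k then st.2.1.set e' (st.2.1.getD e' 0 + st.2.2 * b) else st.2.1,
           st.2.2 * a)) (pvTblS (2*k+1).toNat s, pvTblS (k+1).toNat t, 1) =
      (pvTblS (2*k+1).toNat (fun e' => if e' < e then s e' + a ^ e' else s e'),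
       pvTblS (k+1).toNat (fun e' => if e' < e then t e' + a ^ e' * b else t e'),
       a ^ e) := by
    intro e
    induction e with
    | zero =>
        intro _
        simp only [List.range_zero, List.foldl_nil, pow_zero]
        refine Prod.ext ?_ (Prod.ext ?_ rfl) <;>
          · apply pvTblS_congr; intro r _; simp
    | succ e ih =>
        intro he
        have hem : e < (2*k+1).toNat := by omega
        rw [List.range_succ, List.foldl_append, ih (by omega), List.foldl_cons, List.foldl_nil]
        refine Prod.ext ?_ (Prod.ext ?_ ?_)
        · show (pvTblS (2*k+1).toNat _).set e ((pvTblS (2*k+1).toNat _).getD e 0 + a ^ e) = _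
          unfold pvTblS
          rw [pvGetDMapRange _ _ hem, if_neg (Nat.lt_irrefl e), pvSetMapRange _ _ hem]
          refine List.map_congr_left (fun r hr => ?_)
          split_ifs with h1 h2 h3 <;> first | rfl | (exfalso; omega) | (rw [h1])
        · show (if (e:Int) ≤ k then _ else _) = _
          by_cases hek : (e:Int) ≤ k
          · have hen : e < (k+1).toNat := by omega
            rw [if_pos hek]
            show (pvTblS (k+1).toNat _).set e ((pvTblS (k+1).toNat _).getD e 0 + a ^ e * b) = _
            unfold pvTblS
            rw [pvGetDMapRange _ _ hen, if_neg (Nat.lt_irrefl e), pvSetMapRange _ _ hen]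
            refine List.map_congr_left (fun r hr => ?_)
            split_ifs with h1 h2 h3 <;> first | rfl | (exfalso; omega) | (rw [h1])
          · rw [if_neg hek]
            apply pvTblS_congr
            intro r hr
            have hre : r < e := by omega
            rw [if_pos hre, if_pos (by omega)]
        · show _ * a = a ^ (e + 1)
          rw [pow_succ]
  simp only [pvStepB]
  rw [inv (2*k+1).toNat le_rfl]
  refine Prod.ext ?_ ?_
  · apply pvTblS_congr; intro r hr; rw [if_pos hr]
  · apply pvTblS_congr; intro r hr; rw [if_pos (by omega)]

theorem pvFoldB {k : Int} (hk : 0 ≤ k) :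
    ∀ (zs : List (Int × Int)) (s t : Nat → Int),
      zs.foldl (pvStepB k) (pvTblS (2*k+1).toNat s, pvTblS (k+1).toNat t) =
        (pvTblS (2*k+1).toNat (fun e => s e + (zs.map (fun p => p.1 ^ e)).sum),
         pvTblS (k+1).toNat (fun e => t e + (zs.map (fun p => p.1 ^ e * p.2)).sum)) := by
  intro zs
  induction zs with
  | nil =>
      intro s t
      simp only [List.foldl_nil, List.map_nil, List.sum_nil]
      refine Prod.ext ?_ ?_ <;> (apply pvTblS_congr; intro r _; simp)
  | cons p zs ih =>
      intro s t
      obtain ⟨a, b⟩ := p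
      rw [List.foldl_cons, pvStepB_eq hk, ih]
      refine Prod.ext ?_ ?_ <;>
        · apply pvTblS_congr; intro r _; simp [add_assoc]

theorem pvSliceRow {k : Int} (hk : 0 ≤ k) (Sf : Nat → Int) {i : Nat}
    (hi : i < (k+1).toNat) :
    PySem.List.slice (pvTblS (2*k+1).toNat Sf) (some (i:Int)) (some ((i:Int) + k + 1)) =
      (List.range (k+1).toNat).map (fun j => Sf (i + j)) := by
  have hb : (i:Int) + k + 1 = (i:Int) + (((k+1).toNat : Nat) : Int) := by omega
  rw [hb, PySem.List.slice_natCast_add]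
  apply List.ext_getElem
  · simp [pvTblS]; omega
  · intro j h1 h2
    simp only [List.length_take, List.length_drop, pvTblS, List.length_map,
      List.length_range, List.length_map, List.length_range] at h1 h2
    simp [pvTblS, List.getElem_take, List.getElem_drop]

-- ----- putting the two sides together -----

theorem pvZipFst {x y : List Int} (hxy : x.length ≤ y.length) (e : Nat) :
    ((x.zip y).map (fun p => p.1 ^ e)).sum = (x.map (fun a => a ^ e)).sum := by
  have h2 : (x.zip y).map Prod.fst = x := List.map_fst_zip hxy
  calc ((x.zip y).map (fun p => p.1 ^ e)).sum
      = (((x.zip y).map Prod.fst).map (fun a => a ^ e)).sum := by rw [List.map_map]; rfl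
    _ = (x.map (fun a => a ^ e)).sum := by rw [h2]

theorem pvZipXY {x y : List Int} (hxy : x.length ≤ y.length) (e : Nat) :
    ((x.zip y).map (fun p => p.1 ^ e * p.2)).sum =
      ((List.range x.length).map (fun i => (x.getD i 0) ^ e * (y.getD i 0))).sum := by
  congr 1
  apply List.ext_getElem
  · simp; omega
  · intro j h1 h2
    simp only [List.length_map, List.length_zip] at h1
    have hjx : j < x.length := by omega
    have hjy : j < y.length := by omega
    simp only [List.getElem_map, List.getElem_zip, List.getElem_range]
    rw [List.getD_eq_getElem _ _ hjx, List.getD_eq_getElem _ _ hjy]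

theorem polycoeff_alt_eq {x y : List Int} {k : Int} (hk : 0 ≤ k)
    (hxy : x.length ≤ y.length) :
    polycoeff_alt x y k =
      (pvTbl (k+1).toNat (fun r c => (x.map (fun a => a ^ (r+c))).sum),
       pvTblY (k+1).toNat (fun r => pvSumxyik x y (r:Int))) := by
  unfold polycoeff_alt
  rw [if_neg (by omega)]
  rw [pvReplTblS, pvReplTblS, pvFoldB hk]
  simp only []
  refine Prod.ext ?_ ?_
  · unfold pvTbl
    refine List.map_congr_left (fun i hi => ?_)
    have hi' := List.mem_range.1 hi
    rw [pvSliceRow hk _ hi']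
    refine List.map_congr_left (fun j hj => ?_)
    rw [zero_add, pvZipFst hxy]
  · unfold pvTblS pvTblY
    rw [List.map_map]
    refine List.map_congr_left (fun r hr => ?_)
    simp only [Function.comp_apply]
    rw [zero_add, pvZipXY hxy, pvSumxyik_eq,
        show ((r:Nat):Int).toNat = r from rfl]

-- ===== VERDICT (by name: the statement is the Claim_ definition above) =====
theorem polycoeff_spec : Claim_equal_polycoeff := by
  intro x y k _ hpre
  unfold Spec_polycoeff
  by_cases hk : k < 0
  · have hn : (k+1).toNat = 0 := by omega
    rw [polycoeff_eq]
    unfold polycoeff_alt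
    rw [if_pos hk, hn]
    simp [pvTbl, pvTblY]
  · have hk' : 0 ≤ k := by omega
    have hxy : x.length ≤ y.length := hpre.resolve_left hk
    rw [polycoeff_eq, polycoeff_alt_eq hk' hxy]
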